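-- pv_equiv track=rewrite | github.com/shenyuanwu/Racket-learning | hw7.py | skip_string
-- ===== SOURCE A (Python) =====
-- def skip_string(string,skip_amount=(-1)):
--     """return the string strat with first letter and skip skip_amount letter each time
--     skip_amount defaults to -1
--
--     str,num -> str
--     str -> str"""
--     i = 0
--     str1 = ""
--     if skip_amount > 0:
--         while 0 <= i < len(string):
--             str1 = str1 + string[i]
--             i = i + skip_amount + 1
--         return str1
--     return string[0] * string.count(string[0],0,len(string))
-- ===== SOURCE B (Python) =====
-- def skip_string(string, skip_amount=(-1)):
--     """return the string strat with first letter and skip skip_amount letter each time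
--     skip_amount defaults to -1
--
--     str,num -> str
--     str -> str"""
--     if skip_amount > 0:
--         step = skip_amount + 1
--         parts = []
--         s = string
--         while s:
--             parts.append(s[0])
--             s = s[step:]
--         return "".join(parts)
--     return string[0] * string.count(string[0], 0, len(string))
-- ===== Notes on version B (the rewrite author's own statement) =====
-- stated objective: alternative
-- what changed: The index-stepping while-loop with integer bound checks and string concatenation is replaced by a loop over successive suffixes (take the head, drop skip_amount+1 characters) that joins the collected characters once; no index is maintained.
import Mathlib
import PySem

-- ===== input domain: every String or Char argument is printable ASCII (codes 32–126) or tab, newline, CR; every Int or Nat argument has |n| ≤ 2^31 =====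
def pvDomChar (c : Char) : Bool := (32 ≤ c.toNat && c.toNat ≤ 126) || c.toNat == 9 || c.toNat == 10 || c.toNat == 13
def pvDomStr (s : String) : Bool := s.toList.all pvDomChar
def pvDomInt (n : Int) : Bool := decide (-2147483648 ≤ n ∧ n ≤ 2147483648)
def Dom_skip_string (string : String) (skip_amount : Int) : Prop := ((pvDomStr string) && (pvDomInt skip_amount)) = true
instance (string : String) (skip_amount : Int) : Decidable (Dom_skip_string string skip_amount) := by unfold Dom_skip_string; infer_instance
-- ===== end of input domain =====

-- B replaces A's index-stepping while-loop and string concatenation by a loop over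
-- successive suffixes (take the head, drop skip_amount+1); same return value on Pre_.


-- ===== PORT A =====
-- A's while-loop: index i starts at 0, steps by skip_amount+1, appends string[i].
-- The fuel argument only makes the recursion total; with step ≥ 1 (the only way the
-- loop is entered) fuel = length + 1 is never exhausted before the loop exits.
def skipLoopA (cs : List Char) (step : Int) : Nat → Int → List Char → List Char
  | 0, _, acc => acc
  | fuel + 1, i, acc =>
    if 0 ≤ i ∧ i < (cs.length : Int) then
      skipLoopA cs step fuel (i + step) (acc ++ [cs.getD i.toNat ' '])
    else acc

def skip_string (string : String) (skip_amount : Int) : String :=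
  let cs := string.toList
  if skip_amount > 0 then
    String.ofList (skipLoopA cs (skip_amount + 1) (cs.length + 1) 0 [])
  else
    match cs with
    | [] => ""  -- Python raises IndexError on string[0]; excluded by Pre_skip_string
    | c :: _ => String.ofList (List.replicate (cs.count c) c)

-- ===== PORT B =====
-- B's while-loop over suffixes: take the head, then s = s[step:] (drop step).
def skipLoopB (step : Nat) (s : List Char) : List Char :=
  match s with
  | [] => []
  | c :: rest => c :: skipLoopB step (rest.drop (step - 1))  -- (c::rest).drop step for step ≥ 1
termination_by s.length
decreasing_by simp [List.length_drop]

def skip_string_alt (string : String) (skip_amount : Int) : String :=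
  if skip_amount > 0 then
    String.ofList (skipLoopB (skip_amount + 1).toNat string.toList)
  else
    match string.toList with
    | [] => ""  -- Python raises IndexError on string[0]; excluded by Pre_skip_string
    | c :: _ => String.ofList (List.replicate (string.toList.count c) c)

-- ===== PRECONDITION & SPEC =====
-- Pre_ excludes only the inputs where A raises IndexError: empty string with skip_amount ≤ 0.
def Pre_skip_string (string : String) (skip_amount : Int) : Prop :=
  0 < skip_amount ∨ string ≠ ""
instance (string : String) (skip_amount : Int) : Decidable (Pre_skip_string string skip_amount) := by unfold Pre_skip_string; infer_instance

def pvWitness_skip_string : String × Int := ("hello", 2)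

def Spec_skip_string (string : String) (skip_amount : Int) (out : String) : Prop := out = skip_string_alt string skip_amount
instance (string : String) (skip_amount : Int) (out : String) : Decidable (Spec_skip_string string skip_amount out) := by unfold Spec_skip_string; infer_instance

-- ===== CLAIM (what is proved, stated in full; the proofs are below) =====
def Claim_equal_skip_string : Prop := ∀ (string : String) (skip_amount : Int), Dom_skip_string string skip_amount → Pre_skip_string string skip_amount → Spec_skip_string string skip_amount (skip_string string skip_amount)

-- ===== LEMMAS AND PROOFS =====
lemma skipLoopB_nil (step : Nat) : skipLoopB step [] = [] := by
  rw [skipLoopB.eq_def]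

lemma skipLoopB_cons (step : Nat) (c : Char) (rest : List Char) :
    skipLoopB step (c :: rest) = c :: skipLoopB step (rest.drop (step - 1)) := by
  rw [skipLoopB.eq_def]

lemma skipLoopA_eq_B (cs : List Char) (k : Int) (hk : 1 ≤ k) :
    ∀ (fuel : Nat) (i : Int) (acc : List Char), 0 ≤ i → (cs.drop i.toNat).length ≤ fuel →
      skipLoopA cs k fuel i acc = acc ++ skipLoopB k.toNat (cs.drop i.toNat) := by
  intro fuel
  induction fuel with
  | zero =>
    intro i acc hi hlen
    have : cs.drop i.toNat = [] := List.eq_nil_of_length_eq_zero (by omega)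
    simp [skipLoopA, this, skipLoopB_nil]
  | succ fuel ih =>
    intro i acc hi hlen
    by_cases h : 0 ≤ i ∧ i < (cs.length : Int)
    · have hlt : i.toNat < cs.length := by omega
      have hdrop : cs.drop i.toNat = cs[i.toNat] :: cs.drop (i.toNat + 1) :=
        List.drop_eq_getElem_cons hlt
      have htoNat : (i + k).toNat = i.toNat + k.toNat := by omega
      have hlen2 : (cs.drop (i + k).toNat).length ≤ fuel := by
        simp only [List.length_drop] at hlen ⊢; omega
      have hrec := ih (i + k) (acc ++ [cs.getD i.toNat ' ']) (by omega) hlen2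
      rw [skipLoopA, if_pos h, hrec]
      rw [hdrop, skipLoopB_cons]
      have : (cs.drop (i.toNat + 1)).drop (k.toNat - 1) = cs.drop (i + k).toNat := by
        rw [List.drop_drop, htoNat]
        congr 1; omega
      rw [this]
      simp [List.getD_eq_getElem?_getD, List.getElem?_eq_getElem hlt]
    · have : cs.drop i.toNat = [] := by
        apply List.drop_eq_nil_of_le; omega
      rw [skipLoopA, if_neg h, this]
      simp [skipLoopB_nil]

-- ===== VERDICT (by name: the statement is the Claim_ definition above) =====
theorem skip_string_spec : Claim_equal_skip_string := by
  intro s k _ hpre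
  unfold Spec_skip_string skip_string skip_string_alt
  by_cases hk : k > 0
  · simp only [if_pos hk]
    have h := skipLoopA_eq_B s.toList (k + 1) (by omega) (s.toList.length + 1) 0 []
      (by omega) (by simp)
    simp only [List.nil_append, Int.toNat_zero, List.drop_zero] at h
    rw [h]
  · simp only [if_neg hk]
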